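-- pv_equiv track=rewrite | github.com/CS257-F23/team-project-d | ProductionCode/birth_control.py | count_birth_control_access_answers
-- ===== SOURCE A (Python) =====
-- def count_birth_control_access_answers(birt7_answers):
--     """
--     Counts the amount of each possible response to the birt7 question in the dataset
--     regarding concerns about future access to birth control for the appropriate list
--     of users based on inputted demographic.Then, compiles a dictionary of each possible
--     response and the amount of times that response was chosen.
--         Parameters:
--             birt7_answers = the list of answers to the question about birth control access concerns
--             from the people in the specified demographic.
--     Returns the dictionary totaled_answers which includes the amount of each possible response
--     for the question of birth control access concerns.
--     """
--     veryConcerned=0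
--     somewhatConcerned=0
--     notVeryConcerned=0
--     notAtAllConcerned=0
--     notApplicable=0
--     dontKnow=0
--     refused=0
--
--     totaled_answers={}
--     for item in birt7_answers:
--         if item == "Very concerned":
--             veryConcerned=veryConcerned+1
--         elif item== "Not applicable/don't believe in birth control":
--             notApplicable= notApplicable+1
--         elif item == "Somewhat concerned":
--             somewhatConcerned= somewhatConcerned+1
--         elif item == "Not very concerned":
--             notVeryConcerned=notVeryConcerned+1
--         elif item== "Not at all concerned":
--             notAtAllConcerned=notAtAllConcerned+1
--         elif item == "Don't know":
--             dontKnow=dontKnow+1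
--         else:
--             refused=refused+1
--     totaled_answers["Very concerned"]=veryConcerned
--     totaled_answers["Not applicable/don't believe in birth control"]=notApplicable
--     totaled_answers["Somewhat concerned"]=somewhatConcerned
--     totaled_answers["Not very concerned"]=notVeryConcerned
--     totaled_answers["Not at all concerned"]=notAtAllConcerned
--     totaled_answers["Don't know"]=dontKnow
--     totaled_answers["Refused"]=refused
--     return totaled_answers
-- ===== SOURCE B (Python) =====
-- KEYS = [
--     "Very concerned",
--     "Not applicable/don't believe in birth control",
--     "Somewhat concerned",
--     "Not very concerned",
--     "Not at all concerned",
--     "Don't know",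
-- ]
--
-- def count_birth_control_access_answers(birt7_answers):
--     # Staged passes: no per-item dispatch loop at all. Each recognized response
--     # is counted by its own list.count scan, and "Refused" is the remainder
--     # (total minus recognized), so unknown values land there as in the original.
--     totaled_answers = {k: birt7_answers.count(k) for k in KEYS}
--     totaled_answers["Refused"] = len(birt7_answers) - sum(totaled_answers.values())
--     return totaled_answers
-- ===== Notes on version B (the rewrite author's own statement) =====
-- stated objective: idiomatic
-- what changed: Removed the per-item if/elif dispatch loop with seven named accumulators entirely: B makes one list.count pass per recognized response (six staged scans) and computes 'Refused' as total length minus the sum of recognized counts.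
import Mathlib
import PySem

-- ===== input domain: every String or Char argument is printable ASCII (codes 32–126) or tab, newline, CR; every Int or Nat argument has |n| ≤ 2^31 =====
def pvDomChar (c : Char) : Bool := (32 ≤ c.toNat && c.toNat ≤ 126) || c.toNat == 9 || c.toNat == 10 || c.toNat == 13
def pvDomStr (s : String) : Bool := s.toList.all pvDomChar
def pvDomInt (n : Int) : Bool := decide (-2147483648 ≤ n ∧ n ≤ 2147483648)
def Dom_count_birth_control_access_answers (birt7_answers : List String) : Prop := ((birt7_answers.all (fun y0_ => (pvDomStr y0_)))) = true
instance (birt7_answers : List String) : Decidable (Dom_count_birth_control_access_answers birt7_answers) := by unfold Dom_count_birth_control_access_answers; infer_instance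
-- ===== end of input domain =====

-- B drops A's per-item if/elif dispatch loop: one list.count scan per recognized
-- response and "Refused" by subtraction (objective: idiomatic).

-- ===== PORT A =====
-- A's loop body: the if/elif chain over the seven counters
-- (vc, sc, nvc, naac, nap, dk, r), branches in A's order.
def bcStepA (s : Int × Int × Int × Int × Int × Int × Int) (item : String) :
    Int × Int × Int × Int × Int × Int × Int :=
  let (vc, sc, nvc, naac, nap, dk, r) := s
  if item == "Very concerned" then (vc + 1, sc, nvc, naac, nap, dk, r)
  else if item == "Not applicable/don't believe in birth control" then (vc, sc, nvc, naac, nap + 1, dk, r)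
  else if item == "Somewhat concerned" then (vc, sc + 1, nvc, naac, nap, dk, r)
  else if item == "Not very concerned" then (vc, sc, nvc + 1, naac, nap, dk, r)
  else if item == "Not at all concerned" then (vc, sc, nvc, naac + 1, nap, dk, r)
  else if item == "Don't know" then (vc, sc, nvc, naac, nap, dk + 1, r)
  else (vc, sc, nvc, naac, nap, dk, r + 1)

def count_birth_control_access_answers (birt7_answers : List String) : List (String × Int) :=
  let st := birt7_answers.foldl bcStepA (0, 0, 0, 0, 0, 0, 0)
  [("Very concerned", st.1),
   ("Not applicable/don't believe in birth control", st.2.2.2.2.1),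
   ("Somewhat concerned", st.2.1),
   ("Not very concerned", st.2.2.1),
   ("Not at all concerned", st.2.2.2.1),
   ("Don't know", st.2.2.2.2.2.1),
   ("Refused", st.2.2.2.2.2.2)]

-- ===== PORT B =====
def bcKeys : List String :=
  ["Very concerned",
   "Not applicable/don't believe in birth control",
   "Somewhat concerned",
   "Not very concerned",
   "Not at all concerned",
   "Don't know"]

def count_birth_control_access_answers_alt (birt7_answers : List String) : List (String × Int) :=
  let totaled := bcKeys.map (fun k => (k, (PySem.List.count birt7_answers k : Int)))
  totaled ++ [("Refused", (birt7_answers.length : Int) - (totaled.map (·.2)).sum)]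

-- ===== PRECONDITION & SPEC =====
def Spec_count_birth_control_access_answers (birt7_answers : List String) (out : List (String × Int)) : Prop := out = count_birth_control_access_answers_alt birt7_answers
instance (birt7_answers : List String) (out : List (String × Int)) : Decidable (Spec_count_birth_control_access_answers birt7_answers out) := by unfold Spec_count_birth_control_access_answers; infer_instance

-- ===== CLAIM (what is proved, stated in full; the proofs are below) =====
def Claim_equal_count_birth_control_access_answers : Prop := ∀ (birt7_answers : List String), Dom_count_birth_control_access_answers birt7_answers → Spec_count_birth_control_access_answers birt7_answers (count_birth_control_access_answers birt7_answers)

-- ===== LEMMAS AND PROOFS =====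

-- A's fold state, characterised: each counter is its start value plus the count of
-- its response string; the last component absorbs everything unrecognized.
theorem foldA_eq (l : List String) (a b c d e f g : Int) :
    l.foldl bcStepA (a, b, c, d, e, f, g)
    = (a + l.count "Very concerned",
       b + l.count "Somewhat concerned",
       c + l.count "Not very concerned",
       d + l.count "Not at all concerned",
       e + l.count "Not applicable/don't believe in birth control",
       f + l.count "Don't know",
       g + ((l.length : Int)
            - l.count "Very concerned" - l.count "Somewhat concerned"
            - l.count "Not very concerned" - l.count "Not at all concerned"
            - l.count "Not applicable/don't believe in birth control" - l.count "Don't know")) := by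
  induction l generalizing a b c d e f g with
  | nil => simp
  | cons x xs ih =>
    by_cases h1 : x = "Very concerned"
    · have hs : bcStepA (a, b, c, d, e, f, g) x = (a + 1, b, c, d, e, f, g) := by
        simp [bcStepA, h1]
      rw [List.foldl_cons, hs, ih]
      simp [List.count_cons, h1, Prod.mk.injEq]
      omega
    · by_cases h2 : x = "Not applicable/don't believe in birth control"
      · have hs : bcStepA (a, b, c, d, e, f, g) x = (a, b, c, d, e + 1, f, g) := by
          simp [bcStepA, h1, h2]
        rw [List.foldl_cons, hs, ih]
        simp [List.count_cons, h1, h2, Prod.mk.injEq]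
        omega
      · by_cases h3 : x = "Somewhat concerned"
        · have hs : bcStepA (a, b, c, d, e, f, g) x = (a, b + 1, c, d, e, f, g) := by
            simp [bcStepA, h1, h2, h3]
          rw [List.foldl_cons, hs, ih]
          simp [List.count_cons, h1, h2, h3, Prod.mk.injEq]
          omega
        · by_cases h4 : x = "Not very concerned"
          · have hs : bcStepA (a, b, c, d, e, f, g) x = (a, b, c + 1, d, e, f, g) := by
              simp [bcStepA, h1, h2, h3, h4]
            rw [List.foldl_cons, hs, ih]
            simp [List.count_cons, h1, h2, h3, h4, Prod.mk.injEq]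
            omega
          · by_cases h5 : x = "Not at all concerned"
            · have hs : bcStepA (a, b, c, d, e, f, g) x = (a, b, c, d + 1, e, f, g) := by
                simp [bcStepA, h1, h2, h3, h4, h5]
              rw [List.foldl_cons, hs, ih]
              simp [List.count_cons, h1, h2, h3, h4, h5, Prod.mk.injEq]
              omega
            · by_cases h6 : x = "Don't know"
              · have hs : bcStepA (a, b, c, d, e, f, g) x = (a, b, c, d, e, f + 1, g) := by
                  simp [bcStepA, h1, h2, h3, h4, h5, h6]
                rw [List.foldl_cons, hs, ih]
                simp [List.count_cons, h1, h2, h3, h4, h5, h6, Prod.mk.injEq]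
                omega
              · have hs : bcStepA (a, b, c, d, e, f, g) x = (a, b, c, d, e, f, g + 1) := by
                  simp [bcStepA, h1, h2, h3, h4, h5, h6]
                rw [List.foldl_cons, hs, ih]
                simp [List.count_cons, h1, h2, h3, h4, h5, h6, Prod.mk.injEq]
                omega

-- ===== VERDICT (by name: the statement is the Claim_ definition above) =====
theorem count_birth_control_access_answers_spec : Claim_equal_count_birth_control_access_answers := by
  intro l _
  show count_birth_control_access_answers l = count_birth_control_access_answers_alt l
  unfold count_birth_control_access_answers count_birth_control_access_answers_alt bcKeys
  simp only [foldA_eq, PySem.List.count_eq, List.map_cons, List.map_nil,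
    List.cons_append, List.nil_append, List.sum_cons, List.sum_nil]
  norm_num
  ring_nf
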